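-- pv_equiv track=rewrite | github.com/bbengt1/yolo-developer | src/yolo_developer/gates/gates/confidence_scoring.py | _is_documentation_file
-- ===== SOURCE A (Python) =====
-- def _is_documentation_file(path: str) -> bool:
--     """Check if a file path is a documentation file.
--
--     Args:
--         path: File path to check.
--
--     Returns:
--         True if the file is a README or documentation file.
--     """
--     path_lower = path.lower()
--     filename = path_lower.split("/")[-1]
--
--     # Check for README files
--     if filename.startswith("readme"):
--         return True
--
--     # Check for common documentation directories and files
--     doc_patterns = ["docs/", "doc/", "documentation/"]
--     if any(pattern in path_lower for pattern in doc_patterns):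
--         return True
--
--     # Check for common documentation file extensions in root
--     doc_extensions = [".md", ".rst", ".txt"]
--     doc_names = ["contributing", "changelog", "license", "authors", "history"]
--     for name in doc_names:
--         for ext in doc_extensions:
--             if filename == f"{name}{ext}":
--                 return True
--
--     return False
-- ===== SOURCE B (Python) =====
-- def _is_documentation_file(path: str) -> bool:
--     """Check if a file path is a documentation file (README, docs dir, or a
--     known doc filename split once at its last dot)."""
--     path_lower = path.lower()
--     filename = path_lower.split("/")[-1]
--
--     if filename.startswith("readme"):
--         return True
--
--     if any(p in path_lower for p in ("docs/", "doc/", "documentation/")):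
--         return True
--
--     stem, dot, ext = filename.rpartition(".")
--     return (
--         dot == "."
--         and stem in {"contributing", "changelog", "license", "authors", "history"}
--         and ext in {"md", "rst", "txt"}
--     )
-- ===== Notes on version B (the rewrite author's own statement) =====
-- stated objective: simpler
-- what changed: The nested doc_names x doc_extensions equality loop is replaced by a single rpartition of the filename at its last dot followed by two set-membership tests (README and doc-directory checks unchanged).
import Mathlib
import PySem

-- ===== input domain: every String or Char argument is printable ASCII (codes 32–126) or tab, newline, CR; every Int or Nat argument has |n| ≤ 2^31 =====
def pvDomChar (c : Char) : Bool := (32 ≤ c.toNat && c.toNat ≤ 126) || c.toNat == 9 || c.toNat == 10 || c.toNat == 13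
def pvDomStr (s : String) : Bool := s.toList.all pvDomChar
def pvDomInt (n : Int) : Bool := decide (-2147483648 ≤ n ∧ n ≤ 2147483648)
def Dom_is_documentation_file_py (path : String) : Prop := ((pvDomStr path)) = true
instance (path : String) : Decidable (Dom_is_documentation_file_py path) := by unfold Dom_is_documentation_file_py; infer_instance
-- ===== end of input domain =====

-- B replaces A's nested doc_names × doc_extensions equality loop by one rpartition at the
-- last dot plus two membership tests (objective: simpler; same README/doc-dir checks).

-- ===== PORT A =====
-- doc_names and doc_extensions, as in A
def pvDocNames : List (List Char) :=
  ["contributing".toList, "changelog".toList, "license".toList, "authors".toList, "history".toList]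
def pvDocExts : List (List Char) := [".md".toList, ".rst".toList, ".txt".toList]

def is_documentation_file_py (path : String) : Bool :=
  let path_lower := PySem.Chars.lower path.toList
  -- path_lower.split("/") is never empty, so the [-1] index always succeeds (getD unreachable)
  let filename := (PySem.List.pyGet? (PySem.Chars.splitOn path_lower ['/']) (-1)).getD []
  if PySem.Chars.startswith filename "readme".toList then true
  else if ["docs/".toList, "doc/".toList, "documentation/".toList].any
      (fun p => PySem.Chars.isIn p path_lower) then true
  else
    -- for name in doc_names: for ext in doc_extensions: if filename == f"{name}{ext}": return True
    pvDocNames.any (fun name => pvDocExts.any (fun ext => filename == name ++ ext))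

-- ===== PORT B =====
-- hand port of filename.rpartition("."): scans from the right for the last '.';
-- none = no dot (Python's ("", "", filename) case), some (stem, ext) = (stem, ".", ext).
-- Exact for the single-character separator ".".
def pvRPartitionDot (acc : List Char) : List Char → Option (List Char × List Char)
  | [] => none
  | c :: rest => if c = '.' then some (rest.reverse, acc) else pvRPartitionDot (c :: acc) rest

def is_documentation_file_py_alt (path : String) : Bool :=
  let path_lower := PySem.Chars.lower path.toList
  -- path_lower.split("/") is never empty, so the [-1] index always succeeds (getD unreachable)
  let filename := (PySem.List.pyGet? (PySem.Chars.splitOn path_lower ['/']) (-1)).getD []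
  if PySem.Chars.startswith filename "readme".toList then true
  else if ["docs/".toList, "doc/".toList, "documentation/".toList].any
      (fun p => PySem.Chars.isIn p path_lower) then true
  else
    match pvRPartitionDot [] filename.reverse with
    | none => false                     -- dot == "" : not a doc filename
    | some (stem, ext) =>
        ["contributing".toList, "changelog".toList, "license".toList, "authors".toList,
          "history".toList].contains stem
        && ["md".toList, "rst".toList, "txt".toList].contains ext

-- ===== PRECONDITION & SPEC =====
def Spec_is_documentation_file_py (path : String) (out : Bool) : Prop := out = is_documentation_file_py_alt path
instance (path : String) (out : Bool) : Decidable (Spec_is_documentation_file_py path out) := by unfold Spec_is_documentation_file_py; infer_instance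

-- ===== CLAIM (what is proved, stated in full; the proofs are below) =====
def Claim_equal_is_documentation_file_py : Prop := ∀ (path : String), Dom_is_documentation_file_py path → Spec_is_documentation_file_py path (is_documentation_file_py path)

-- ===== LEMMAS AND PROOFS =====

-- pvRPartitionDot reconstructs its input: stem ++ '.' :: ext = (reversed input) ++ acc
theorem pvRPartitionDot_some (rl : List Char) :
    ∀ (acc stem ext : List Char), pvRPartitionDot acc rl = some (stem, ext) →
      stem ++ '.' :: ext = rl.reverse ++ acc := by
  induction rl with
  | nil => intro acc stem ext h; simp [pvRPartitionDot] at h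
  | cons c rest ih =>
    intro acc stem ext h
    by_cases hc : c = '.'
    · subst hc
      simp [pvRPartitionDot] at h
      obtain ⟨h1, h2⟩ := h
      simp [← h1, ← h2]
    · rw [pvRPartitionDot, if_neg hc] at h
      have := ih (c :: acc) stem ext h
      simpa using this

-- the nested name × ext loop equals B's rpartition check, for every filename
theorem pvLoop_eq_rpartition (fl : List Char) :
    pvDocNames.any (fun name => pvDocExts.any (fun ext => fl == name ++ ext)) =
      (match pvRPartitionDot [] fl.reverse with
       | none => false
       | some (stem, ext) =>
        ["contributing".toList, "changelog".toList, "license".toList, "authors".toList,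
          "history".toList].contains stem
        && ["md".toList, "rst".toList, "txt".toList].contains ext) := by
  rw [Bool.eq_iff_iff]
  constructor
  · intro h
    simp [pvDocNames, pvDocExts] at h
    rcases h with (h|h|h|h|h) <;> rcases h with (h|h|h) <;> subst h <;> decide
  · intro h
    cases hsplit : pvRPartitionDot [] fl.reverse with
    | none => rw [hsplit] at h; simp at h
    | some p =>
      obtain ⟨stem, ext⟩ := p
      rw [hsplit] at h
      simp only [Bool.and_eq_true] at h
      obtain ⟨hs, he⟩ := h
      have hfl : stem ++ '.' :: ext = fl := by
        simpa using pvRPartitionDot_some fl.reverse [] stem ext hsplit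
      simp [List.contains_eq_mem] at hs
      simp [List.contains_eq_mem] at he
      subst hfl
      rcases hs with (hs|hs|hs|hs|hs) <;> rcases he with (he|he|he) <;> subst hs <;> subst he <;> decide

-- ===== VERDICT (by name: the statement is the Claim_ definition above) =====
theorem is_documentation_file_py_spec : Claim_equal_is_documentation_file_py := by
  intro path _
  unfold Spec_is_documentation_file_py is_documentation_file_py is_documentation_file_py_alt
  simp only []
  split_ifs with h1 h2
  · rfl
  · rfl
  · exact pvLoop_eq_rpartition _
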